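-- pv_equiv track=rewrite | github.com/juandarr/ProjectEuler | 116.py | coloured_block_counting
-- ===== SOURCE A (Python) =====
-- def coloured_block_counting(limit_n):
--     '''
--     returns the number of ways a row of n block can be filled with colored blocks of 2,3 and 4
--     '''
--     n = 1
--     variations=[{1:0},{1:0},{1:0}]
--     while n<=limit_n:
--         for block in [2,3,4]:
--             counter = 0
--             for idx in range(n-block+1):
--                 counter +=1
--                 if n-(block+idx)>=block:
--                     counter += variations[block-2][n-(block+idx)]
--             variations[block-2][n]=counter
--         n += 1
--     return sum([variations[i][limit_n] for i in range(3)])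
-- ===== SOURCE B (Python) =====
-- def coloured_block_counting(limit_n):
--     '''
--     returns the number of ways a row of n block can be filled with colored blocks of 2,3 and 4
--     '''
--     total = 0
--     for b in (2, 3, 4):
--         # f[n] = number of tilings of a row of n using at least one coloured block of size b
--         f = [0] * b
--         for n in range(b, limit_n + 1):
--             f.append(f[n - 1] + f[n - b] + 1)
--         total += f[limit_n]
--     return total
-- ===== Notes on version B (the rewrite author's own statement) =====
-- stated objective: faster
-- what changed: Replaces A's quadratic inner scan (for each n and block size, an O(n) loop re-summing earlier dictionary entries) with the linear recurrence f[n] = f[n-1] + f[n-b] + 1 per block size, one O(limit_n) pass over a plain list.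
import Mathlib
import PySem

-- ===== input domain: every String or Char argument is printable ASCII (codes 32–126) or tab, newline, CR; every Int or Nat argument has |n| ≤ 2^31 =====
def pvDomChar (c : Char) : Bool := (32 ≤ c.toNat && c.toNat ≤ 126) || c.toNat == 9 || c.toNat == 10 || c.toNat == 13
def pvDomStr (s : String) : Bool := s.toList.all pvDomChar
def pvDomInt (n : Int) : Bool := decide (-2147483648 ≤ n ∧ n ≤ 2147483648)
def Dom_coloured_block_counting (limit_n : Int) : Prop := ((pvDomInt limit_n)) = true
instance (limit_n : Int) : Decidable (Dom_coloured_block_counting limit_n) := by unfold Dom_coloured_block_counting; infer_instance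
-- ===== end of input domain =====

-- B replaces A's quadratic re-summation of earlier dictionary entries by the linear
-- recurrence f[n] = f[n-1] + f[n-b] + 1 per block size, one pass over a plain list (objective: faster).

-- ===== PORT A =====
-- the inner 'for idx in range(n-block+1)' loop; the dict access variations[block-2][...]
-- never misses a key on admitted inputs (Pre_), so it is ported as getD with default 0
def pvACounter (d : PySem.Dict Int Int) (block n : Int) : Int :=
  (PySem.List.pyRange 0 (n - block + 1) 1).foldl
    (fun counter idx =>
      let counter := counter + 1
      if n - (block + idx) ≥ block then counter + d.getD (n - (block + idx)) 0 else counter)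
    0

-- the body of the while loop: 'for block in [2,3,4]: … variations[block-2][n] = counter'
def pvAStep (n : Int) (vs : List (PySem.Dict Int Int)) : List (PySem.Dict Int Int) :=
  [(2 : Int), 3, 4].foldl
    (fun vs block =>
      let d := PySem.List.pyGetD vs (block - 2) PySem.Dict.empty
      PySem.List.pySetD vs (block - 2) (d.insert n (pvACounter d block n)))
    vs

def coloured_block_counting (limit_n : Int) : Int :=
  -- 'while n <= limit_n: …; n += 1' starting at n = 1 is the counted loop over 1..limit_n
  let variations : List (PySem.Dict Int Int) :=
    [PySem.Dict.ofList [(1, 0)], PySem.Dict.ofList [(1, 0)], PySem.Dict.ofList [(1, 0)]]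
  let variations := (PySem.List.pyRange 1 (limit_n + 1) 1).foldl (fun vs n => pvAStep n vs) variations
  ((PySem.List.pyRange 0 3 1).map
      (fun i => (PySem.List.pyGetD variations i PySem.Dict.empty).getD limit_n 0)).sum

-- ===== PORT B =====
def coloured_block_counting_alt (limit_n : Int) : Int :=
  [(2 : Int), 3, 4].foldl
    (fun total b =>
      let f := (PySem.List.pyRange b (limit_n + 1) 1).foldl
          (fun f n =>
            f ++ [PySem.List.pyGetD f (n - 1) 0 + PySem.List.pyGetD f (n - b) 0 + 1])
          (List.replicate b.toNat 0)
      total + PySem.List.pyGetD f limit_n 0)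
    0

-- ===== PRECONDITION & SPEC =====
-- A raises KeyError for limit_n ≤ 0 (the final dict lookups variations[i][limit_n] miss); excluded.
def Pre_coloured_block_counting (limit_n : Int) : Prop := 1 ≤ limit_n
instance (limit_n : Int) : Decidable (Pre_coloured_block_counting limit_n) := by
  unfold Pre_coloured_block_counting; infer_instance
def pvWitness_coloured_block_counting : Int := (4)

def Spec_coloured_block_counting (limit_n : Int) (out : Int) : Prop :=
  out = coloured_block_counting_alt limit_n
instance (limit_n : Int) (out : Int) : Decidable (Spec_coloured_block_counting limit_n out) := by
  unfold Spec_coloured_block_counting; infer_instance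

-- ===== CLAIM (what is proved, stated in full; the proofs are below) =====
def Claim_equal_coloured_block_counting : Prop :=
  ∀ (limit_n : Int), Dom_coloured_block_counting limit_n →
    Pre_coloured_block_counting limit_n →
    Spec_coloured_block_counting limit_n (coloured_block_counting limit_n)

-- ===== LEMMAS AND PROOFS =====

-- the clean recurrence both ports compute: number of tilings of a row of n
-- with at least one coloured block of size b
def Fc (b n : Nat) : Int :=
  if h : 0 < b ∧ b ≤ n then Fc b (n - 1) + Fc b (n - b) + 1 else 0
termination_by n
decreasing_by all_goals omega

theorem Fc_zero (b n : Nat) (h : n < b ∨ b = 0) : Fc b n = 0 := by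
  rw [Fc]; rw [dif_neg]; omega

theorem Fc_rec (b n : Nat) (hb : 0 < b) (h : b ≤ n) :
    Fc b n = Fc b (n - 1) + Fc b (n - b) + 1 := by
  rw [Fc]; rw [dif_pos ⟨hb, h⟩]


-- reflect a sum over range
theorem pvSumReflect (g : Nat → Int) (t : Nat) :
    ((List.range t).map (fun i => g (t - 1 - i))).sum = ((List.range t).map g).sum := by
  induction t generalizing g with
  | zero => simp
  | succ t ih =>
    calc ((List.range (t + 1)).map (fun i => g (t + 1 - 1 - i))).sum
        = ((List.range t).map (fun i => g (t - i))).sum + g 0 := by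
          rw [List.range_succ]
          simp
      _ = ((List.range t).map (fun i => g ((t - 1 - i) + 1))).sum + g 0 := by
          congr 1
          apply congrArg
          apply List.map_congr_left
          intro i hi
          have hit := List.mem_range.mp hi
          congr 1
          omega
      _ = ((List.range t).map (fun j => g (j + 1))).sum + g 0 := by
          rw [ih (fun j => g (j + 1))]
      _ = ((List.range (t + 1)).map g).sum := by
          rw [List.range_succ_eq_map]
          simp only [List.map_cons, List.sum_cons, List.map_map]
          rw [add_comm]
          rfl

-- the summation identity behind A's inner loop
theorem Fc_sum (b : Nat) (hb : 0 < b) : ∀ n, b ≤ n →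
    Fc b n = ((n - b + 1 : Nat) : Int) + ((List.range (n - b + 1)).map (Fc b)).sum := by
  intro n
  induction n with
  | zero => intro h; omega
  | succ n ih =>
    intro h
    by_cases hn : b ≤ n
    · have e1 : n + 1 - b + 1 = (n - b + 1) + 1 := by omega
      rw [e1, List.range_succ, List.map_append, List.sum_append]
      have e2 : n + 1 - b = n - b + 1 := by omega
      rw [Fc_rec b (n + 1) hb h]
      have e3 : n + 1 - 1 = n := by omega
      rw [e3, ih hn, e2]
      simp only [List.map_cons, List.map_nil, List.sum_cons, List.sum_nil]
      push_cast
      ring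
    · have hbn : b = n + 1 := by omega
      subst hbn
      have e1 : n + 1 - (n + 1) + 1 = 1 := by omega
      rw [e1, Fc_rec (n + 1) (n + 1) hb (le_refl _)]
      have e2 : n + 1 - 1 = n := by omega
      have e3 : n + 1 - (n + 1) = 0 := by omega
      rw [e2, e3]
      rw [Fc_zero (n + 1) n (by omega), Fc_zero (n + 1) 0 (by omega)]
      simp [Fc_zero (n + 1) 0 (by omega)]

-- A's inner counter loop computes Fc, given the dict holds Fc on 1..n-1
theorem counter_eq (b : Nat) (hb : 2 ≤ b) (n : Int) (hn : 1 ≤ n)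
    (d : PySem.Dict Int Int)
    (hd : ∀ m : Int, 1 ≤ m → m < n → d.getD m 0 = Fc b m.toNat) :
    pvACounter d (b : Int) n = Fc b n.toNat := by
  unfold pvACounter
  have hfun : (fun (counter : Int) (idx : Int) =>
      let counter := counter + 1
      if n - ((b : Int) + idx) ≥ (b : Int) then counter + d.getD (n - ((b : Int) + idx)) 0 else counter)
      = fun (counter : Int) (idx : Int) =>
        counter + ((1 : Int) + if (b : Int) ≤ n - ((b : Int) + idx) then d.getD (n - ((b : Int) + idx)) 0 else 0) := by
    funext c i
    simp only [ge_iff_le]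
    split_ifs <;> ring
  rw [hfun, PySem.List.foldl_add, zero_add]
  by_cases hcase : (b : Int) ≤ n
  · set t : Nat := (n - b + 1).toNat with ht
    have hK : n - (b : Int) + 1 = (t : Int) := by omega
    rw [hK, PySem.List.pyRange_zero_natCast, List.map_map]
    have hcong : (List.range t).map ((fun idx : Int =>
          (1 : Int) + if (b : Int) ≤ n - ((b : Int) + idx) then d.getD (n - ((b : Int) + idx)) 0 else 0)
            ∘ (fun k : Nat => (k : Int)))
        = (List.range t).map (fun i : Nat => 1 + Fc b (t - 1 - i)) := by
      apply List.map_congr_left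
      intro i hi
      have hit : i < t := List.mem_range.mp hi
      simp only [Function.comp_apply]
      congr 1
      by_cases hc : (b : Int) ≤ n - ((b : Int) + (i : Int))
      · rw [if_pos hc]
        rw [hd _ (by omega) (by omega)]
        congr 1
        omega
      · rw [if_neg hc]
        rw [Fc_zero b (t - 1 - i) (by omega)]
    rw [hcong]
    rw [PySem.List.sum_map_add_int (List.range t) (fun _ => (1 : Int)) (fun i => Fc b (t - 1 - i))]
    rw [pvSumReflect (Fc b) t]
    rw [PySem.List.sum_map_const_int (List.range t) 1]
    have hFs := Fc_sum b (by omega) n.toNat (by omega)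
    have e : n.toNat - b + 1 = t := by omega
    rw [e] at hFs
    rw [hFs]
    simp only [List.length_range]
    ring
  · have hnil : PySem.List.pyRange 0 (n - (b : Int) + 1) 1 = [] :=
      PySem.List.pyRange_one_eq_nil (by omega)
    rw [hnil]
    simp only [List.map_nil, List.sum_nil]
    rw [Fc_zero b n.toNat (by omega)]

-- first-match lookup in a dict literal built from a range of distinct keys
theorem get?_mk_range (g : Int → Int × Int) (hg : ∀ j, (g j).1 = j) (bnd : Int) :
    ∀ (t : Nat) (a m : Int), (bnd - a).toNat = t → a ≤ m → m < bnd →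
    (PySem.Dict.mk ((PySem.List.pyRange a bnd 1).map g)).get? m = some (g m).2 := by
  intro t
  induction t with
  | zero => intro a m h1 h2 h3; omega
  | succ t ih =>
    intro a m h1 h2 h3
    rw [PySem.List.pyRange_one_cons (by omega), List.map_cons]
    have hga : g a = (a, (g a).2) := Prod.ext (hg a) rfl
    rw [hga, PySem.Dict.get?_mk_cons]
    by_cases hma : a = m
    · subst hma
      simp
    · rw [if_neg (by simpa using hma)]
      exact ih (a + 1) m (by omega) (by omega) h3

-- the dict A maintains for block size b, after rows 1..n-1 have been processed
def Db (b : Nat) (n : Int) : PySem.Dict Int Int :=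
  PySem.Dict.mk ((1, 0) :: (PySem.List.pyRange 2 n 1).map (fun m => (m, Fc b m.toNat)))

theorem getD_Db (b : Nat) (hb : 2 ≤ b) (n m : Int) (h1 : 1 ≤ m) (h2 : m < n ∨ m = 1) :
    (Db b n).getD m 0 = Fc b m.toNat := by
  unfold Db
  rw [PySem.Dict.getD_eq_get?_getD, PySem.Dict.get?_mk_cons]
  by_cases hm1 : m = 1
  · subst hm1
    rw [if_pos (by simp)]
    rw [show ((1 : Int)).toNat = 1 from rfl, Fc_zero b 1 (by omega)]
    rfl
  · rw [if_neg (by simpa using fun h => hm1 h.symm)]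
    rw [get?_mk_range (fun m => (m, Fc b m.toNat)) (fun _ => rfl) n (n - 2).toNat 2 m rfl
      (by omega) (by omega)]
    rfl

theorem insert_Db (b : Nat) (hb : 2 ≤ b) (n : Int) (hn : 1 ≤ n) :
    (Db b n).insert n (Fc b n.toNat) = Db b (n + 1) := by
  by_cases h1 : n = 1
  · subst h1
    have hr1 : PySem.List.pyRange 2 1 1 = [] := PySem.List.pyRange_one_eq_nil (by omega)
    have hr2 : PySem.List.pyRange 2 (1 + 1) 1 = [] := PySem.List.pyRange_one_eq_nil (by omega)
    simp only [Db, hr1, hr2, List.map_nil]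
    rw [show Fc b ((1 : Int)).toNat = 0 from Fc_zero b 1 (by omega)]
    apply PySem.Dict.ext
    rw [PySem.Dict.items_insert_of_contains _ _ (by decide)]
    simp
  · have hn2 : 2 ≤ n := by omega
    have hnc : (Db b n).contains n = false := by
      rw [PySem.Dict.contains_eq_decide_mem_keys]
      simp only [decide_eq_false_iff_not]
      unfold Db
      rw [PySem.Dict.keys_mk]
      simp only [List.map_cons, List.map_map, List.mem_cons]
      rintro (h | h)
      · omega
      · simp only [List.mem_map, Function.comp] at h
        obtain ⟨j, hj, hj2⟩ := h
        have := PySem.List.mem_pyRange_one.mp hj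
        omega
    apply PySem.Dict.ext
    rw [PySem.Dict.items_insert_of_not_contains _ _ hnc]
    unfold Db
    rw [PySem.List.pyRange_one_succ_right (by omega : (2 : Int) ≤ n), List.map_append]
    rfl

theorem pySetD_zero {α : Type} (xs : List α) (v : α) :
    PySem.List.pySetD xs (0 : Int) v = xs.set 0 v := by
  simpa using PySem.List.pySetD_natCast xs 0 v

theorem pySetD_one {α : Type} (xs : List α) (v : α) :
    PySem.List.pySetD xs (1 : Int) v = xs.set 1 v := by
  simpa using PySem.List.pySetD_natCast xs 1 v

theorem pySetD_two {α : Type} (xs : List α) (v : α) :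
    PySem.List.pySetD xs (2 : Int) v = xs.set 2 v := by
  simpa using PySem.List.pySetD_natCast xs 2 v

-- one iteration of A's while loop advances the state
theorem step_eq (n : Int) (hn : 1 ≤ n) :
    pvAStep n [Db 2 n, Db 3 n, Db 4 n] = [Db 2 (n + 1), Db 3 (n + 1), Db 4 (n + 1)] := by
  have hc2 : pvACounter (Db 2 n) 2 n = Fc 2 n.toNat := by
    have := counter_eq 2 (by omega) n hn (Db 2 n)
      (fun m hm1 hm2 => getD_Db 2 (by omega) n m hm1 (Or.inl hm2))
    simpa using this
  have hc3 : pvACounter (Db 3 n) 3 n = Fc 3 n.toNat := by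
    have := counter_eq 3 (by omega) n hn (Db 3 n)
      (fun m hm1 hm2 => getD_Db 3 (by omega) n m hm1 (Or.inl hm2))
    simpa using this
  have hc4 : pvACounter (Db 4 n) 4 n = Fc 4 n.toNat := by
    have := counter_eq 4 (by omega) n hn (Db 4 n)
      (fun m hm1 hm2 => getD_Db 4 (by omega) n m hm1 (Or.inl hm2))
    simpa using this
  unfold pvAStep
  simp only [List.foldl_cons, List.foldl_nil]
  norm_num [PySem.List.pyGetD_ofNat', pySetD_zero, pySetD_one, pySetD_two, List.set, List.getD]
  rw [hc2, hc3, hc4]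
  rw [insert_Db 2 (by omega) n hn, insert_Db 3 (by omega) n hn, insert_Db 4 (by omega) n hn]
  simp

theorem A_loop (N : Int) (hN : 1 ≤ N) :
    (PySem.List.pyRange 1 N 1).foldl (fun vs n => pvAStep n vs)
      [Db 2 1, Db 3 1, Db 4 1] = [Db 2 N, Db 3 N, Db 4 N] := by
  induction N, hN using Int.le_induction with
  | base =>
    rw [PySem.List.pyRange_one_eq_nil (by omega)]
    rfl
  | succ n hn ih =>
    rw [PySem.List.pyRange_one_succ_right (by omega : (1 : Int) ≤ n), List.foldl_append]
    rw [ih]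
    simp only [List.foldl_cons, List.foldl_nil]
    exact step_eq n hn

theorem Db_one (b : Nat) : Db b 1 = PySem.Dict.ofList [(1, 0)] := by
  unfold Db
  rw [PySem.List.pyRange_one_eq_nil (by omega)]
  rfl

-- B's list after the loop for block size b holds Fc b at every index
theorem B_build (b : Nat) (hb : 0 < b) (k : Nat) (hk : b ≤ k) :
    (PySem.List.pyRange (b : Int) (k : Int) 1).foldl
      (fun f n => f ++ [PySem.List.pyGetD f (n - 1) 0 + PySem.List.pyGetD f (n - (b : Int)) 0 + 1])
      (List.replicate b 0) = (List.range k).map (Fc b) := by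
  induction k, hk using Nat.le_induction with
  | base =>
    rw [PySem.List.pyRange_one_eq_nil (by omega)]
    simp only [List.foldl_nil]
    apply List.ext_getElem
    · simp
    · intro i h1 h2
      simp only [List.getElem_replicate, List.getElem_map, List.getElem_range]
      rw [Fc_zero b i (Or.inl (by simpa using h1))]
  | succ k hk ih =>
    have hcast : ((k + 1 : Nat) : Int) = (k : Int) + 1 := by push_cast; ring
    rw [hcast, PySem.List.pyRange_one_succ_right (by exact_mod_cast hk), List.foldl_append]
    rw [ih]
    simp only [List.foldl_cons, List.foldl_nil]
    have hg1 : PySem.List.pyGetD ((List.range k).map (Fc b)) ((k : Int) - 1) 0 = Fc b (k - 1) := by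
      rw [PySem.List.pyGetD_eq_getElem _ _ (by omega) (by simp only [List.length_map, List.length_range]; omega)]
      simp only [List.getElem_map, List.getElem_range]
      congr 1
      omega
    have hg2 : PySem.List.pyGetD ((List.range k).map (Fc b)) ((k : Int) - (b : Int)) 0 = Fc b (k - b) := by
      rw [PySem.List.pyGetD_eq_getElem _ _ (by omega) (by simp only [List.length_map, List.length_range]; omega)]
      simp only [List.getElem_map, List.getElem_range]
      congr 1
      omega
    rw [hg1, hg2, List.range_succ, List.map_append]
    simp only [List.map_cons, List.map_nil]
    rw [Fc_rec b k hb hk]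

theorem B_val (b : Nat) (hb : 2 ≤ b) (limit_n : Int) (h : 1 ≤ limit_n) :
    PySem.List.pyGetD
      ((PySem.List.pyRange (b : Int) (limit_n + 1) 1).foldl
        (fun f n => f ++ [PySem.List.pyGetD f (n - 1) 0 + PySem.List.pyGetD f (n - (b : Int)) 0 + 1])
        (List.replicate ((b : Int)).toNat 0))
      limit_n 0 = Fc b limit_n.toNat := by
  have hbt : ((b : Int)).toNat = b := by omega
  rw [hbt]
  by_cases hbl : (b : Int) ≤ limit_n
  · have hk : limit_n + 1 = ((limit_n.toNat + 1 : Nat) : Int) := by omega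
    rw [hk, B_build b (by omega) (limit_n.toNat + 1) (by omega)]
    rw [PySem.List.pyGetD_eq_getElem _ _ (by omega) (by simp only [List.length_map, List.length_range]; omega)]
    simp only [List.getElem_map, List.getElem_range]
  · have hnil : PySem.List.pyRange (b : Int) (limit_n + 1) 1 = [] :=
      PySem.List.pyRange_one_eq_nil (by omega)
    rw [hnil]
    simp only [List.foldl_nil]
    rw [PySem.List.pyGetD_eq_getElem _ _ (by omega) (by simp only [List.length_replicate]; omega)]
    simp only [List.getElem_replicate]
    rw [Fc_zero b limit_n.toNat (by omega)]

-- ===== VERDICT (by name: the statement is the Claim_ definition above) =====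
theorem coloured_block_counting_spec : Claim_equal_coloured_block_counting := by
  intro limit_n hdom hpre
  unfold Pre_coloured_block_counting at hpre
  unfold Spec_coloured_block_counting
  have hA : coloured_block_counting limit_n
      = Fc 2 limit_n.toNat + Fc 3 limit_n.toNat + Fc 4 limit_n.toNat := by
    simp only [coloured_block_counting]
    rw [show [PySem.Dict.ofList [((1 : Int), (0 : Int))], PySem.Dict.ofList [(1, 0)],
          PySem.Dict.ofList [(1, 0)]] = [Db 2 1, Db 3 1, Db 4 1] by
        rw [Db_one 2, Db_one 3, Db_one 4]]
    rw [A_loop (limit_n + 1) (by omega)]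
    rw [show PySem.List.pyRange 0 3 1 = [0, 1, 2] by decide]
    simp only [List.map_cons, List.map_nil, List.sum_cons, List.sum_nil]
    norm_num [PySem.List.pyGetD_ofNat', List.getD]
    rw [getD_Db 2 (by omega) (limit_n + 1) limit_n (by omega) (Or.inl (by omega)),
      getD_Db 3 (by omega) (limit_n + 1) limit_n (by omega) (Or.inl (by omega)),
      getD_Db 4 (by omega) (limit_n + 1) limit_n (by omega) (Or.inl (by omega))]
    ring
  have hB : coloured_block_counting_alt limit_n
      = Fc 2 limit_n.toNat + Fc 3 limit_n.toNat + Fc 4 limit_n.toNat := by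
    simp only [coloured_block_counting_alt]
    simp only [List.foldl_cons, List.foldl_nil]
    have h2 := B_val 2 (by omega) limit_n hpre
    have h3 := B_val 3 (by omega) limit_n hpre
    have h4 := B_val 4 (by omega) limit_n hpre
    norm_num at h2 h3 h4 ⊢
    rw [h2, h3, h4]
  rw [hA, hB]
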